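-- pv_equiv track=rewrite | github.com/ubinici/CMPE493-A1 | query_processor.py | proximity_query
-- ===== SOURCE A (Python) =====
-- def proximity_query(query, index):
--     token1, max_dist, token2 = query # Dissect the query tuple accordingly
--
--     if token1 in index and token2 in index: # Check if both tokens are in the index
--         intersection = set(index[token1].keys()).intersection(index[token2].keys()) # Compute the intersection and store it in the variable
--         matching_docs = [doc_id for doc_id in intersection # Iterate through common document IDs
--                          if any(abs(p1 - p2) - 1 <= max_dist for p1 in index[token1][doc_id] for p2 in index[token2][doc_id])] # Check if the distance between the two tokens is within range
--
--     else:
--         matching_docs = []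
--
--     return sorted(matching_docs) # Return sorted list of matching documents
-- ===== SOURCE B (Python) =====
-- def _min_gap(a, b):
--     # a, b sorted ascending; smallest |x - y| over pairs, None if either is empty
--     i, j, best = 0, 0, None
--     while i < len(a) and j < len(b):
--         d = abs(a[i] - b[j])
--         if best is None or d < best:
--             best = d
--         if a[i] <= b[j]:
--             i += 1
--         else:
--             j += 1
--     return best
--
--
-- def proximity_query(query, index):
--     token1, max_dist, token2 = query
--     if token1 not in index or token2 not in index:
--         return []
--     d1, d2 = index[token1], index[token2]
--     result = []
--     for doc_id, ps1 in d1.items():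
--         if doc_id in d2:
--             g = _min_gap(sorted(ps1), sorted(d2[doc_id]))
--             if g is not None and g <= max_dist + 1:
--                 result.append(doc_id)
--     result.sort()
--     return result
-- ===== Notes on version B (the rewrite author's own statement) =====
-- stated objective: alternative
-- what changed: Per common document, A tests all position pairs (any over the cross product); B sorts each position list and runs a two-pointer minimum-gap pass, iterating over token1's doc dict and checking membership in token2's instead of building a key-set intersection.
import Mathlib
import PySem

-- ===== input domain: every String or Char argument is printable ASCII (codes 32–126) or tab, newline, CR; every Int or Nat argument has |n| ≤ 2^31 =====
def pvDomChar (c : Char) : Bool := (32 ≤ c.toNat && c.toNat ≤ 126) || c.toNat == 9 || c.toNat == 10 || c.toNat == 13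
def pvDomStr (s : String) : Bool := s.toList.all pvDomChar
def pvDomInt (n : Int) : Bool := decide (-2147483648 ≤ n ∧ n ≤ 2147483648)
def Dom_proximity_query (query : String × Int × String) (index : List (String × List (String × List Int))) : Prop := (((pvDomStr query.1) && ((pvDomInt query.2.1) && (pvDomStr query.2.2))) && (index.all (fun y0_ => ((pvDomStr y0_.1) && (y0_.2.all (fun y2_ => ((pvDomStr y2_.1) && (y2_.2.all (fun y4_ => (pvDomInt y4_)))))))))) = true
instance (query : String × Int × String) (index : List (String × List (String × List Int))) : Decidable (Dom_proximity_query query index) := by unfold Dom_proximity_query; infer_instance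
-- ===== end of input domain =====

-- B replaces A's per-document all-pairs position scan by a two-pointer minimum-gap pass
-- over sorted position lists (objective: alternative algorithm). Return-value equivalence only.

-- ===== PORT A =====
-- any(abs(p1 - p2) - 1 <= max_dist for p1 in ps1 for p2 in ps2)
def pvCloseA (max_dist : Int) (ps1 ps2 : List Int) : Bool :=
  ps1.any (fun p1 => ps2.any (fun p2 => decide (((p1 - p2).natAbs : Int) - 1 ≤ max_dist)))

def proximity_query (query : String × Int × String) (index : List (String × List (String × List Int))) : List String :=
  let token1 := query.1
  let max_dist := query.2.1
  let token2 := query.2.2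
  let idx : PySem.Dict String (PySem.Dict String (List Int)) :=
    PySem.Dict.ofList (index.map (fun p => (p.1, PySem.Dict.ofList p.2)))
  let matching_docs :=
    if idx.contains token1 && idx.contains token2 then
      -- index[token1] / index[token2]: guarded by the contains test, so getD's default is never used
      let d1 := idx.getD token1 PySem.Dict.empty
      let d2 := idx.getD token2 PySem.Dict.empty
      let inter := PySem.Set.inter (PySem.Set.ofList d1.keys) (PySem.Set.ofList d2.keys)
      -- index[token1][doc_id] / index[token2][doc_id]: doc_id ∈ intersection of the key sets, so present
      inter.filter (fun doc_id => pvCloseA max_dist (d1.getD doc_id []) (d2.getD doc_id []))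
    else []
  PySem.List.sorted matching_docs (fun x => x) false

-- ===== PORT B =====
-- 'if best is None or d < best: best = d'
def pvBestUpd (best : Option Int) (d : Int) : Option Int :=
  match best with
  | none => some d
  | some b => if d < b then some d else some b

-- _min_gap(a, b): two-pointer walk over sorted lists, carrying the running best
def pvMinGapAux : List Int → List Int → Option Int → Option Int
  | [], _, best => best
  | _ :: _, [], best => best
  | x :: xs, y :: ys, best =>
    let d : Int := ((x - y).natAbs : Int)
    let best' := pvBestUpd best d
    if x ≤ y then pvMinGapAux xs (y :: ys) best' else pvMinGapAux (x :: xs) ys best'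
termination_by a b _ => a.length + b.length

def proximity_query_alt (query : String × Int × String) (index : List (String × List (String × List Int))) : List String :=
  let token1 := query.1
  let max_dist := query.2.1
  let token2 := query.2.2
  let idx : PySem.Dict String (PySem.Dict String (List Int)) :=
    PySem.Dict.ofList (index.map (fun p => (p.1, PySem.Dict.ofList p.2)))
  match idx.get? token1, idx.get? token2 with
  | some d1, some d2 =>
    let result := d1.items.foldl (fun acc p =>
      if d2.contains p.1 &&
         (match pvMinGapAux (PySem.List.sorted p.2 (fun x => x) false)
                            (PySem.List.sorted (d2.getD p.1 []) (fun x => x) false) none with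
          | none => false
          | some g => decide (g ≤ max_dist + 1)) then acc ++ [p.1] else acc) []
    PySem.List.sorted result (fun x => x) false
  | _, _ => []

-- ===== PRECONDITION & SPEC =====
def Spec_proximity_query (query : String × Int × String) (index : List (String × List (String × List Int))) (out : List String) : Prop := out = proximity_query_alt query index
instance (query : String × Int × String) (index : List (String × List (String × List Int))) (out : List String) : Decidable (Spec_proximity_query query index out) := by unfold Spec_proximity_query; infer_instance

-- ===== CLAIM (what is proved, stated in full; the proofs are below) =====
def Claim_equal_proximity_query : Prop := ∀ (query : String × Int × String) (index : List (String × List (String × List Int))), Dom_proximity_query query index → Spec_proximity_query query index (proximity_query query index)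

-- ===== LEMMAS AND PROOFS =====

-- every item of Dict.ofList l comes from l
theorem pv_mem_items_foldl_insert {κ ν : Type} [BEq κ] [LawfulBEq κ] (l : List (κ × ν)) (d : PySem.Dict κ ν)
    (p : κ × ν) (h : p ∈ (l.foldl (fun d q => d.insert q.1 q.2) d).items) :
    p ∈ d.items ∨ p ∈ l := by
  induction l generalizing d with
  | nil => exact Or.inl h
  | cons q t ih =>
    rcases ih (d.insert q.1 q.2) (by simpa [List.foldl] using h) with h' | h'
    · rcases (PySem.Dict.mem_items_insert _ _ _ _).1 h' with h'' | h''
      · exact Or.inr (by simp [h''])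
      · exact Or.inl h''.1
    · exact Or.inr (List.mem_cons_of_mem _ h')

theorem pv_mem_items_ofList {κ ν : Type} [BEq κ] [LawfulBEq κ] (l : List (κ × ν)) (p : κ × ν)
    (h : p ∈ (PySem.Dict.ofList l).items) : p ∈ l := by
  rcases pv_mem_items_foldl_insert l PySem.Dict.empty p (by
    simpa [PySem.Dict.ofList, PySem.Dict.update] using h) with h' | h'
  · simp [PySem.Dict.empty] at h'
  · exact h'

-- the two-pointer walk reaches the bound k iff some pair does (on sorted inputs)
theorem pv_best'_iff (best : Option Int) (d k : Int) :
    (∃ g, pvBestUpd best d = some g ∧ g ≤ k) ↔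
      ((∃ g, best = some g ∧ g ≤ k) ∨ d ≤ k) := by
  cases best with
  | none => simp [pvBestUpd]
  | some b => by_cases h : d < b <;> simp [pvBestUpd, h] <;> omega

theorem pv_gapAux_iff (k : Int) : ∀ (n : Nat) (a b : List Int) (best : Option Int),
    a.length + b.length ≤ n →
    a.Pairwise (· ≤ ·) → b.Pairwise (· ≤ ·) →
    ((∃ g, pvMinGapAux a b best = some g ∧ g ≤ k) ↔
      ((∃ g, best = some g ∧ g ≤ k) ∨ ∃ x ∈ a, ∃ y ∈ b, ((x - y).natAbs : Int) ≤ k)) := by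
  intro n
  induction n with
  | zero =>
    intro a b best hlen _ _
    match a, b with
    | [], _ => simp [pvMinGapAux]
    | _ :: _, [] => simp [pvMinGapAux]
    | _ :: _, _ :: _ => simp at hlen
  | succ n ih =>
    intro a b best hlen ha hb
    match a, b with
    | [], _ => simp [pvMinGapAux]
    | _ :: _, [] => simp [pvMinGapAux]
    | x :: xs, y :: ys =>
      rw [pvMinGapAux.eq_def]
      dsimp only
      by_cases hxy : x ≤ y
      · rw [if_pos hxy]
        rw [ih xs (y :: ys) _ (by simp at hlen ⊢; omega) ha.of_cons hb, pv_best'_iff]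
        constructor
        · rintro ((h | h) | ⟨x', hx', y', hy', hle⟩)
          · exact Or.inl h
          · exact Or.inr ⟨x, List.mem_cons_self, y, List.mem_cons_self, h⟩
          · exact Or.inr ⟨x', List.mem_cons_of_mem _ hx', y', hy', hle⟩
        · rintro (h | ⟨x', hx', y', hy', hle⟩)
          · exact Or.inl (Or.inl h)
          · rcases List.mem_cons.1 hx' with rfl | hx'
            · refine Or.inl (Or.inr ?_)
              rcases List.mem_cons.1 hy' with rfl | hy'
              · omega
              · have hyy : y ≤ y' := (List.pairwise_cons.1 hb).1 y' hy'
                omega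
            · exact Or.inr ⟨x', hx', y', hy', hle⟩
      · rw [if_neg hxy]
        rw [ih (x :: xs) ys _ (by simp at hlen ⊢; omega) ha hb.of_cons, pv_best'_iff]
        constructor
        · rintro ((h | h) | ⟨x', hx', y', hy', hle⟩)
          · exact Or.inl h
          · exact Or.inr ⟨x, List.mem_cons_self, y, List.mem_cons_self, h⟩
          · exact Or.inr ⟨x', hx', y', List.mem_cons_of_mem _ hy', hle⟩
        · rintro (h | ⟨x', hx', y', hy', hle⟩)
          · exact Or.inl (Or.inl h)
          · rcases List.mem_cons.1 hy' with rfl | hy'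
            · refine Or.inl (Or.inr ?_)
              rcases List.mem_cons.1 hx' with rfl | hx'
              · omega
              · have hxx : x ≤ x' := (List.pairwise_cons.1 ha).1 x' hx'
                omega
            · exact Or.inr ⟨x', hx', y', hy', hle⟩

-- A's pair test equals B's sorted two-pointer test
theorem pv_close_eq (max_dist : Int) (ps1 ps2 : List Int) :
    pvCloseA max_dist ps1 ps2 =
      (match pvMinGapAux (PySem.List.sorted ps1 (fun x => x) false)
                         (PySem.List.sorted ps2 (fun x => x) false) none with
       | none => false
       | some g => decide (g ≤ max_dist + 1)) := by
  have hp1 : (PySem.List.sorted ps1 (fun x => x) false).Pairwise (· ≤ ·) := by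
    simpa using PySem.List.sorted_pairwise ps1 (fun x => x)
  have hp2 : (PySem.List.sorted ps2 (fun x => x) false).Pairwise (· ≤ ·) := by
    simpa using PySem.List.sorted_pairwise ps2 (fun x => x)
  have hiff := pv_gapAux_iff (max_dist + 1)
      ((PySem.List.sorted ps1 (fun x => x) false).length + (PySem.List.sorted ps2 (fun x => x) false).length)
      (PySem.List.sorted ps1 (fun x => x) false) (PySem.List.sorted ps2 (fun x => x) false)
      none le_rfl hp1 hp2
  have hA : pvCloseA max_dist ps1 ps2 = true ↔
      ∃ x ∈ ps1, ∃ y ∈ ps2, ((x - y).natAbs : Int) ≤ max_dist + 1 := by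
    simp only [pvCloseA, List.any_eq_true, decide_eq_true_eq]
    constructor <;> rintro ⟨x, hx, y, hy, h⟩ <;> exact ⟨x, hx, y, hy, by omega⟩
  simp only [PySem.List.mem_sorted] at hiff
  rw [Bool.eq_iff_iff]
  cases hr : pvMinGapAux (PySem.List.sorted ps1 (fun x => x) false)
      (PySem.List.sorted ps2 (fun x => x) false) none with
  | none =>
    rw [hr] at hiff
    simp only [reduceCtorEq, false_and, exists_const, false_iff, false_or, not_exists, not_and] at hiff
    simp only [Bool.false_eq_true, iff_false, hA]
    push Not
    intro x hx y hy
    have := hiff x hx y hy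
    omega
  | some g =>
    rw [hr] at hiff
    have h2 : g ≤ max_dist + 1 ↔ ∃ x ∈ ps1, ∃ y ∈ ps2, ((x - y).natAbs : Int) ≤ max_dist + 1 := by
      simpa using hiff
    simp only [decide_eq_true_eq, hA]
    exact h2.symm

theorem pv_main (query : String × Int × String) (index : List (String × List (String × List Int))) :
    proximity_query query index = proximity_query_alt query index := by
  obtain ⟨token1, max_dist, token2⟩ := query
  simp only [proximity_query, proximity_query_alt]
  cases h1 : (PySem.Dict.ofList (index.map (fun p => (p.1, PySem.Dict.ofList p.2))) :
      PySem.Dict String (PySem.Dict String (List Int))).get? token1 with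
  | none =>
    have hc : (PySem.Dict.ofList (index.map (fun p => (p.1, PySem.Dict.ofList p.2))) :
        PySem.Dict String (PySem.Dict String (List Int))).contains token1 = false := by
      rw [PySem.Dict.contains_eq_isSome_get?, h1]; rfl
    simp [hc, PySem.List.sorted]
  | some d1 =>
    cases h2 : (PySem.Dict.ofList (index.map (fun p => (p.1, PySem.Dict.ofList p.2))) :
        PySem.Dict String (PySem.Dict String (List Int))).get? token2 with
    | none =>
      have hc : (PySem.Dict.ofList (index.map (fun p => (p.1, PySem.Dict.ofList p.2))) :
          PySem.Dict String (PySem.Dict String (List Int))).contains token2 = false := by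
        rw [PySem.Dict.contains_eq_isSome_get?, h2]; rfl
      simp [hc, PySem.List.sorted]
    | some d2 =>
      have hc1 : (PySem.Dict.ofList (index.map (fun p => (p.1, PySem.Dict.ofList p.2))) :
          PySem.Dict String (PySem.Dict String (List Int))).contains token1 = true := by
        rw [PySem.Dict.contains_eq_isSome_get?, h1]; rfl
      have hc2 : (PySem.Dict.ofList (index.map (fun p => (p.1, PySem.Dict.ofList p.2))) :
          PySem.Dict String (PySem.Dict String (List Int))).contains token2 = true := by
        rw [PySem.Dict.contains_eq_isSome_get?, h2]; rfl
      have hnd : ∀ (t : String) (d : PySem.Dict String (List Int)),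
          (PySem.Dict.ofList (index.map (fun p => (p.1, PySem.Dict.ofList p.2))) :
            PySem.Dict String (PySem.Dict String (List Int))).get? t = some d → d.keys.Nodup := by
        intro t d hget
        have hmem := pv_mem_items_ofList _ _ (PySem.Dict.mem_items_of_get?_eq_some _ hget)
        obtain ⟨p, _, hpe⟩ := List.mem_map.1 hmem
        have : PySem.Dict.ofList p.2 = d := congrArg Prod.snd hpe
        rw [← this]
        exact PySem.Dict.nodup_keys_ofList _
      have hnd1 := hnd _ _ h1
      have hnd2 := hnd _ _ h2
      have hg1 : (PySem.Dict.ofList (index.map (fun p => (p.1, PySem.Dict.ofList p.2))) :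
          PySem.Dict String (PySem.Dict String (List Int))).getD token1 PySem.Dict.empty = d1 := by
        rw [PySem.Dict.getD, h1]; rfl
      have hg2 : (PySem.Dict.ofList (index.map (fun p => (p.1, PySem.Dict.ofList p.2))) :
          PySem.Dict String (PySem.Dict String (List Int))).getD token2 PySem.Dict.empty = d2 := by
        rw [PySem.Dict.getD, h2]; rfl
      simp only [hc1, hc2, Bool.and_self, if_true, hg1, hg2]
      congr 1
      rw [PySem.Set.ofList_eq_self_of_nodup _ hnd1, PySem.Set.ofList_eq_self_of_nodup _ hnd2,
        PySem.List.foldl_append_if, List.nil_append]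
      simp only [PySem.Set.inter, PySem.Dict.keys, List.filter_map, List.filter_filter]
      refine congrArg (List.map _) (List.filter_congr ?_)
      intro x hx
      have hx' : (x.1, x.2) ∈ d1.items := hx
      have hcc : PySem.Set.contains (d1.items.map (fun x => x.1)) x.1 = true := by
        rw [PySem.Set.contains_iff]
        exact List.mem_map.2 ⟨x, hx, rfl⟩
      dsimp only [Function.comp]
      by_cases hm : d2.contains x.1
      · have hsc : PySem.Set.contains (List.map (fun x => x.1) d2.items) x.1 = true := by
          rw [PySem.Set.contains_iff]
          rw [PySem.Dict.contains_eq_decide_mem_keys, decide_eq_true_eq] at hm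
          simpa [PySem.Dict.keys] using hm
        rw [hsc, hm, PySem.Dict.getD_of_mem_items d1 hx' hnd1 []]
        simp only [Bool.and_true, Bool.true_and]
        exact pv_close_eq max_dist x.2 (d2.getD x.1 [])
      · have hsc : PySem.Set.contains (List.map (fun x => x.1) d2.items) x.1 = false := by
          rw [Bool.eq_false_iff]
          intro hco
          rw [PySem.Set.contains_iff] at hco
          apply hm
          rw [PySem.Dict.contains_eq_decide_mem_keys, decide_eq_true_eq]
          simpa [PySem.Dict.keys] using hco
        rw [hsc]
        simp [hm]

-- ===== VERDICT (by name: the statement is the Claim_ definition above) =====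
theorem proximity_query_spec : Claim_equal_proximity_query := by
  intro query index _
  exact pv_main query index
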